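-- pv_equiv track=rewrite | github.com/frezendesp/Sorteio | loteria.py | prime_filter
-- ===== SOURCE A (Python) =====
-- def prime_filter(game: tuple[int, ...], value: int) -> bool:
--     def is_prime(n: int) -> bool:
--         if n < 2:
--             return False
--         if n == 2:
--             return True
--         if n % 2 == 0:
--             return False
--         d = 3
--         while d * d <= n:
--             if n % d == 0:
--                 return False
--             d += 2
--         return True
--
--     return sum(1 for n in game if is_prime(n)) == value
-- ===== SOURCE B (Python) =====
-- def prime_filter(game: tuple[int, ...], value: int) -> bool:
--     # Sieve-assisted counting: build a boolean sieve up to isqrt(max(game)) once,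
--     # extract the prime table, then test each entry only against those primes.
--     if not game:
--         return value == 0
--     m = max(game)
--     r = 1
--     while (r + 1) * (r + 1) <= m:
--         r += 1
--     sieve = [True] * (r + 1)
--     for p in range(2, r + 1):
--         for q in range(p, r // p + 1):
--             sieve[p * q] = False
--     primes = [p for p in range(2, r + 1) if sieve[p]]
--     count = 0
--     for n in game:
--         if n >= 2:
--             is_p = True
--             for p in primes:
--                 if p * p > n:
--                     break
--                 if n % p == 0:
--                     is_p = False
--                     break
--             if is_p:
--                 count += 1
--     return count == value
-- ===== Notes on version B (the rewrite author's own statement) =====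
-- stated objective: faster
-- what changed: Instead of an independent odd trial-division loop per element, B computes max(game) once, builds the prime table up to its square root with one product-marking sieve pass, and counts by trial-dividing each element only by those primes.
import Mathlib
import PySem

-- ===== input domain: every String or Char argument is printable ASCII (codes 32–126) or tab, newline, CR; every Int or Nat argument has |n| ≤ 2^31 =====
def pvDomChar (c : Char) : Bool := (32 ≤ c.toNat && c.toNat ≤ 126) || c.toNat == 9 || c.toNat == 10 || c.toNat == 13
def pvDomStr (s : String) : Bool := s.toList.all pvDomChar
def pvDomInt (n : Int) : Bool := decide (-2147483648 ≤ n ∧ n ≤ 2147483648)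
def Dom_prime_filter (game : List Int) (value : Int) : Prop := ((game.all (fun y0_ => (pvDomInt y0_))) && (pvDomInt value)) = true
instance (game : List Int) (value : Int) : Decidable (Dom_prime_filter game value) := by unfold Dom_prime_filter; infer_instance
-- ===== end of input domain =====

-- B replaces A's independent odd trial division per element by one product-marking pass up to
-- √max(game) that yields a prime table, then tests each entry only against those primes
-- (objective: faster — measured).

-- ===== PORT A =====
-- inner while loop of is_prime: d = 3, 5, 7, … while d*d <= n
def trialLoop (n d : Int) : Bool :=
  if _h : d * d ≤ n then
    if PySem.Int.mod n d == 0 then false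
    else trialLoop n (d + 2)
  else true
termination_by (n + 2 - d).toNat
decreasing_by
  have hd : d ≤ n := by
    by_cases h0 : d ≤ 0
    · nlinarith [mul_self_nonneg d]
    · push Not at h0; nlinarith
  omega

def isPrimeA (n : Int) : Bool :=
  if n < 2 then false
  else if n == 2 then true
  else if PySem.Int.mod n 2 == 0 then false
  else trialLoop n 3

def prime_filter (game : List Int) (value : Int) : Bool :=
  decide (game.foldl (fun acc n => if isPrimeA n then acc + 1 else acc) (0 : Int) = value)

-- ===== PORT B =====
-- r = 1; while (r+1)*(r+1) <= m: r += 1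
def rLoop (m r : Int) : Int :=
  if _h : (r + 1) * (r + 1) ≤ m then rLoop m (r + 1) else r
termination_by (m - r).toNat
decreasing_by
  have hd : r + 1 ≤ m := by
    by_cases h0 : r + 1 ≤ 0
    · nlinarith [mul_self_nonneg (r + 1)]
    · push Not at h0; nlinarith
  omega

-- sieve = [True]*(r+1); for p in range(2, r+1): for q in range(p, r//p + 1): sieve[p*q] = False
-- (Array.setIfInBounds is exact here: every marked index p*q lies within the list, as proved below)
def sieveArr (r : Int) : Array Bool :=
  (PySem.List.pyRange 2 (r + 1)).foldl
    (fun a p => (PySem.List.pyRange p (PySem.Int.floordiv r p + 1)).foldl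
      (fun a q => a.setIfInBounds (p * q).toNat false) a)
    (Array.replicate (r + 1).toNat true)

-- primes = [p for p in range(2, r+1) if sieve[p]]  (sieve[p] exact: 2 ≤ p ≤ r < len(sieve))
def primesList (r : Int) (sieve : Array Bool) : List Int :=
  (PySem.List.pyRange 2 (r + 1)).filter (fun p => sieve.getD p.toNat false)

-- for p in primes: if p*p > n: break; if n % p == 0: is_p = False; break
def checkLoop (n : Int) : List Int → Bool
  | [] => true
  | p :: ps =>
    if n < p * p then true
    else if PySem.Int.mod n p == 0 then false
    else checkLoop n ps

def prime_filter_alt (game : List Int) (value : Int) : Bool :=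
  match game with
  | [] => decide (value = 0)
  | x :: t =>
    let m := t.foldl max x
    let r := rLoop m 1
    let sieve := sieveArr r
    let primes := primesList r sieve
    let count := (x :: t).foldl (fun acc n =>
      if 2 ≤ n then (if checkLoop n primes then acc + 1 else acc) else acc) (0 : Int)
    decide (count = value)

-- ===== PRECONDITION & SPEC =====
def Spec_prime_filter (game : List Int) (value : Int) (out : Bool) : Prop := out = prime_filter_alt game value
instance (game : List Int) (value : Int) (out : Bool) : Decidable (Spec_prime_filter game value out) := by unfold Spec_prime_filter; infer_instance

-- ===== CLAIM (what is proved, stated in full; the proofs are below) =====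
def Claim_equal_prime_filter : Prop := ∀ (game : List Int) (value : Int), Dom_prime_filter game value → Spec_prime_filter game value (prime_filter game value)

-- ===== LEMMAS AND PROOFS =====

-- n has a factorisation a*b with 2 ≤ a ≤ b; n ≥ 2 is counted by either program iff ¬ CompositeI n
def CompositeI (n : Int) : Prop := ∃ a b : Int, 2 ≤ a ∧ a ≤ b ∧ n = a * b

theorem trialLoop_true_iff (n : Int) : ∀ (fuel : Nat) (d : Int), (n + 2 - d).toNat ≤ fuel → 0 ≤ d →
    (trialLoop n d = true ↔ ∀ e : Int, (∃ k : Nat, e = d + 2 * k) → e * e ≤ n → ¬ e ∣ n) := by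
  intro fuel
  induction fuel with
  | zero =>
    intro d hf hd
    by_cases hg : d * d ≤ n
    · exfalso
      have hdn : d ≤ n := by nlinarith
      omega
    · rw [trialLoop]; simp only [hg, dite_false]
      constructor
      · rintro - e ⟨k, rfl⟩ he hdvd
        have hk : (0:Int) ≤ (k:Int) := Int.natCast_nonneg k
        have hde : d ≤ d + 2 * k := by omega
        have : d * d ≤ (d + 2 * k) * (d + 2 * k) :=
          mul_le_mul hde hde hd (by omega)
        omega
      · intro _; trivial
  | succ f ih =>
    intro d hf hd
    by_cases hg : d * d ≤ n
    · have hdn : d ≤ n := by nlinarith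
      rw [trialLoop]; simp only [hg, dite_true]
      by_cases hm : PySem.Int.mod n d = 0
      · simp only [hm, beq_self_eq_true, if_true]
        constructor
        · intro h; exact absurd h (by simp)
        · intro H
          exact absurd ((PySem.Int.mod_eq_zero_iff_dvd n d).mp hm)
            (H d ⟨0, by push_cast; ring⟩ hg)
      · have hmb : (PySem.Int.mod n d == 0) = false := beq_eq_false_iff_ne.mpr hm
        simp only [hmb, Bool.false_eq_true, if_false]
        rw [ih (d + 2) (by omega) (by omega)]
        have hnd : ¬ d ∣ n := fun hdvd =>
          hm ((PySem.Int.mod_eq_zero_iff_dvd n d).mpr hdvd)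
        constructor
        · intro H e ⟨k, hk⟩ he
          match k, hk with
          | 0, hk => simpa [show e = d from by push_cast at hk; omega] using hnd
          | (k'+1), hk => exact H e ⟨k', by push_cast at hk ⊢; omega⟩ he
        · intro H e ⟨k, hk⟩ he
          exact H e ⟨k + 1, by push_cast at hk ⊢; omega⟩ he
    · rw [trialLoop]; simp only [hg, dite_false]
      constructor
      · rintro - e ⟨k, rfl⟩ he hdvd
        have hk : (0:Int) ≤ (k:Int) := Int.natCast_nonneg k
        have hde : d ≤ d + 2 * k := by omega
        have : d * d ≤ (d + 2 * k) * (d + 2 * k) :=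
          mul_le_mul hde hde hd (by omega)
        omega
      · intro _; trivial

theorem isPrimeA_iff (n : Int) : isPrimeA n = true ↔ 2 ≤ n ∧ ¬ CompositeI n := by
  unfold isPrimeA
  by_cases h1 : n < 2
  · simp only [h1, if_true, Bool.false_eq_true, false_iff]
    rintro ⟨h2, -⟩; omega
  · simp only [h1, if_false]
    by_cases h2 : n = 2
    · subst h2
      simp only [beq_self_eq_true, if_true, true_iff]
      refine ⟨by omega, ?_⟩
      rintro ⟨a, b, ha, hab, habe⟩; nlinarith
    · have h2b : (n == 2) = false := beq_eq_false_iff_ne.mpr h2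
      simp only [h2b, Bool.false_eq_true, if_false]
      by_cases hm : PySem.Int.mod n 2 = 0
      · have hdvd : (2:Int) ∣ n := (PySem.Int.mod_eq_zero_iff_dvd n 2).mp hm
        simp only [hm, beq_self_eq_true, if_true, Bool.false_eq_true, false_iff]
        rintro ⟨-, hnc⟩
        rcases hdvd with ⟨c, hc⟩
        exact hnc ⟨2, c, by omega, by omega, hc⟩
      · have hmb : (PySem.Int.mod n 2 == 0) = false := beq_eq_false_iff_ne.mpr hm
        simp only [hmb, Bool.false_eq_true, if_false]
        have hodd : ¬ (2:Int) ∣ n := fun h =>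
          hm ((PySem.Int.mod_eq_zero_iff_dvd n 2).mpr h)
        have hn3 : 3 ≤ n := by
          rcases lt_or_ge n 3 with h | h
          · exfalso; have : n = 2 := by omega
            exact h2 this
          · exact h
        rw [trialLoop_true_iff n (n + 2 - 3).toNat 3 (le_refl _) (by omega)]
        constructor
        · intro H
          refine ⟨by omega, ?_⟩
          rintro ⟨a, b, ha, hab, habe⟩
          have hadvd : a ∣ n := Dvd.intro _ (by rw [habe, mul_comm])
          have haodd : ¬ (2:Int) ∣ a := fun h => hodd (h.trans hadvd)
          have haa : a * a ≤ n := by nlinarith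
          exact H a ⟨((a - 3) / 2).toNat, by omega⟩ haa hadvd
        · rintro ⟨-, hnc⟩ e ⟨k, hk⟩ he hdvd
          have hk0 : (0:Int) ≤ (k:Int) := Int.natCast_nonneg k
          have he3 : 3 ≤ e := by omega
          rcases hdvd with ⟨c, hc⟩
          have hec : e ≤ c := by nlinarith
          exact hnc ⟨e, c, by omega, hec, hc⟩

theorem getD_setIfInBounds (a : Array Bool) (i j : Nat) (v d : Bool) :
    (a.setIfInBounds i v).getD j d = if i = j ∧ j < a.size then v else a.getD j d := by
  rw [Array.getD_eq_getD_getElem?, Array.getD_eq_getD_getElem?, Array.getElem?_setIfInBounds]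
  split_ifs with h1 h2 h3 h4 <;> simp_all

theorem inner_fold_getD (l : List Int) (g : Int → Nat) (a : Array Bool) (i : Nat)
    (hi : i < a.size) :
    ((l.foldl (fun a q => a.setIfInBounds (g q) false) a).getD i false = false ↔
      a.getD i false = false ∨ ∃ q ∈ l, g q = i) := by
  induction l generalizing a with
  | nil => simp
  | cons q l ih =>
    simp only [List.foldl_cons, List.mem_cons]
    rw [ih _ (by simp [Array.size_setIfInBounds, hi])]
    rw [getD_setIfInBounds]
    by_cases hq : g q = i
    · simp only [hq, hi, and_true, if_true]
      constructor
      · intro _; right; exact ⟨q, Or.inl rfl, hq⟩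
      · intro _; exact Or.inl trivial
    · simp only [hq, false_and, if_false]
      constructor
      · rintro (h | ⟨q', hq', he⟩)
        · exact Or.inl h
        · exact Or.inr ⟨q', Or.inr hq', he⟩
      · rintro (h | ⟨q', (rfl | hq'), he⟩)
        · exact Or.inl h
        · exact absurd he hq
        · exact Or.inr ⟨q', hq', he⟩

theorem inner_fold_size (l : List Int) (g : Int → Nat) (a : Array Bool) :
    (l.foldl (fun a q => a.setIfInBounds (g q) false) a).size = a.size := by
  induction l generalizing a with
  | nil => rfl
  | cons q l ih => simp [List.foldl_cons, ih, Array.size_setIfInBounds]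

theorem outer_fold_getD (l : List Int) (g : Int → List Int) (a : Array Bool) (i : Nat)
    (hi : i < a.size) :
    ((l.foldl (fun a p => (g p).foldl (fun a q => a.setIfInBounds ((p * q).toNat) false) a) a).getD i false = false ↔
      a.getD i false = false ∨ ∃ p ∈ l, ∃ q ∈ g p, (p * q).toNat = i) := by
  induction l generalizing a with
  | nil => simp
  | cons p l ih =>
    simp only [List.foldl_cons, List.mem_cons]
    rw [ih _ (by rw [inner_fold_size]; exact hi)]
    rw [inner_fold_getD _ _ _ _ hi]
    constructor
    · rintro (h | ⟨p', hp', h⟩)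
      · rcases h with h | ⟨q, hq, he⟩
        · exact Or.inl h
        · exact Or.inr ⟨p, Or.inl rfl, q, hq, he⟩
      · exact Or.inr ⟨p', Or.inr hp', h⟩
    · rintro (h | ⟨p', (rfl | hp'), h⟩)
      · exact Or.inl (Or.inl h)
      · exact Or.inl (Or.inr h)
      · exact Or.inr ⟨p', hp', h⟩

theorem sieve_false_iff (r i : Int) (h2 : 2 ≤ i) (hir : i ≤ r) :
    ((sieveArr r).getD i.toNat false = false ↔ CompositeI i) := by
  have hi : i.toNat < (r + 1).toNat := by omega
  unfold sieveArr
  rw [outer_fold_getD _ _ _ _ (by simpa using hi)]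
  have hrep : (Array.replicate (r + 1).toNat true).getD i.toNat false = true := by
    rw [Array.getD_eq_getD_getElem?]
    simp [hi]
  rw [hrep]
  simp only [Bool.true_eq_false, false_or, PySem.List.mem_pyRange_one]
  constructor
  · rintro ⟨p, ⟨hp2, hpr⟩, q, ⟨hpq, hqd⟩, he⟩
    have hp0 : (0:Int) < p := by omega
    have hqr : q * p ≤ r := (PySem.Int.le_floordiv_iff_mul_le hp0).mp (by omega)
    have hq0 : (0:Int) < q := by omega
    have hpq' : (0:Int) < p * q := mul_pos hp0 hq0
    have : i = p * q := by omega
    exact ⟨p, q, hp2, hpq, this⟩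
  · rintro ⟨a, b, ha, hab, he⟩
    have ha0 : (0:Int) < a := by omega
    have habr : a * b ≤ r := by omega
    have hbd : b ≤ PySem.Int.floordiv r a :=
      (PySem.Int.le_floordiv_iff_mul_le ha0).mpr (by linarith [mul_comm a b])
    have har : a < r + 1 := by nlinarith
    exact ⟨a, ⟨ha, har⟩, b, ⟨hab, by omega⟩, by omega⟩

theorem mem_primesList (r p : Int) :
    p ∈ primesList r (sieveArr r) ↔ 2 ≤ p ∧ p ≤ r ∧ ¬ CompositeI p := by
  unfold primesList
  rw [List.mem_filter]
  simp only [PySem.List.mem_pyRange_one]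
  constructor
  · rintro ⟨⟨h2, hr⟩, hc⟩
    refine ⟨h2, by omega, ?_⟩
    intro hcomp
    rw [← sieve_false_iff r p h2 (by omega)] at hcomp
    rw [hcomp] at hc
    cases hc
  · rintro ⟨h2, hr, hnc⟩
    refine ⟨⟨h2, by omega⟩, ?_⟩
    rw [← sieve_false_iff r p h2 hr] at hnc
    simpa using hnc

theorem pairwise_primesList (r : Int) : (primesList r (sieveArr r)).Pairwise (· < ·) :=
  (PySem.List.pairwise_lt_pyRange_one 2 (r + 1)).filter _

theorem checkLoop_true_iff (n : Int) (l : List Int) (h2 : ∀ p ∈ l, 2 ≤ p)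
    (hs : l.Pairwise (· < ·)) :
    checkLoop n l = true ↔ ∀ p ∈ l, p * p ≤ n → ¬ p ∣ n := by
  induction l with
  | nil => simp [checkLoop]
  | cons p ps ih =>
    rcases List.pairwise_cons.mp hs with ⟨hhead, htail⟩
    have hp2 : 2 ≤ p := h2 p (List.mem_cons_self ..)
    by_cases hlt : n < p * p
    · simp only [checkLoop, hlt, if_true, true_iff]
      intro p' hp' hpp'
      exfalso
      rcases List.mem_cons.mp hp' with rfl | hmem
      · omega
      · have hle : p ≤ p' := le_of_lt (hhead p' hmem)
        have : p * p ≤ p' * p' := mul_le_mul hle hle (by omega) (by omega)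
        omega
    · simp only [checkLoop, hlt, if_false]
      by_cases hm : PySem.Int.mod n p = 0
      · simp only [hm, beq_self_eq_true, if_true, Bool.false_eq_true, false_iff]
        intro H
        exact H p (List.mem_cons_self ..) (by omega)
          ((PySem.Int.mod_eq_zero_iff_dvd n p).mp hm)
      · have hmb : (PySem.Int.mod n p == 0) = false := beq_eq_false_iff_ne.mpr hm
        simp only [hmb, Bool.false_eq_true, if_false]
        rw [ih (fun q hq => h2 q (List.mem_cons_of_mem _ hq)) htail]
        constructor
        · intro H p' hp' hpp'
          rcases List.mem_cons.mp hp' with rfl | hmem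
          · exact fun hd => hm ((PySem.Int.mod_eq_zero_iff_dvd n p').mpr hd)
          · exact H p' hmem hpp'
        · intro H p' hp' hpp'
          exact H p' (List.mem_cons_of_mem _ hp') hpp'

theorem rLoop_spec (m : Int) : ∀ (fuel : Nat) (r0 : Int), (m - r0).toNat ≤ fuel →
    r0 ≤ rLoop m r0 ∧ ¬ ((rLoop m r0 + 1) * (rLoop m r0 + 1) ≤ m) := by
  intro fuel
  induction fuel with
  | zero =>
    intro r0 hf
    rw [rLoop]
    by_cases hg : (r0 + 1) * (r0 + 1) ≤ m
    · exfalso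
      have : r0 + 1 ≤ m := by
        by_cases h0 : r0 + 1 ≤ 0
        · nlinarith [mul_self_nonneg (r0 + 1)]
        · push Not at h0; nlinarith
      omega
    · simp only [hg, dite_false]
      exact ⟨le_refl _, not_false⟩
  | succ f ih =>
    intro r0 hf
    rw [rLoop]
    by_cases hg : (r0 + 1) * (r0 + 1) ≤ m
    · have hrm : r0 + 1 ≤ m := by
        by_cases h0 : r0 + 1 ≤ 0
        · nlinarith [mul_self_nonneg (r0 + 1)]
        · push Not at h0; nlinarith
      simp only [hg, dite_true]
      rcases ih (r0 + 1) (by omega) with ⟨h1, h2⟩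
      exact ⟨by omega, h2⟩
    · simp only [hg, dite_false]
      exact ⟨le_refl _, not_false⟩

theorem not_compositeI_of_prime {k : Nat} (hk : k.Prime) : ¬ CompositeI (k : Int) := by
  rintro ⟨a, b, ha, hab, he⟩
  have hb2 : (2:Int) ≤ b := le_trans ha hab
  have hk4 : (4:Int) ≤ (k:Int) := by nlinarith
  have hklt : a < (k:Int) := by nlinarith
  have hadvd : a.toNat ∣ k := by
    have : a ∣ (k:Int) := Dvd.intro _ (by rw [he, mul_comm])
    have ha0 : (0:Int) ≤ a := by omega
    rcases this with ⟨c, hc⟩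
    have hc0 : (0:Int) ≤ c := by nlinarith
    have hcast : ((a.toNat * c.toNat : Nat) : Int) = (k : Int) := by
      push_cast
      rw [Int.toNat_of_nonneg ha0, Int.toNat_of_nonneg hc0]
      omega
    exact ⟨c.toNat, by exact_mod_cast hcast.symm⟩
  have := (Nat.prime_def_lt.mp hk).2 a.toNat (by omega) hadvd
  omega

theorem minFactor_of_composite {n : Int} (h : CompositeI n) :
    ∃ p : Int, 2 ≤ p ∧ ¬ CompositeI p ∧ p * p ≤ n ∧ p ∣ n := by
  obtain ⟨a, b, ha, hab, he⟩ := h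
  have hn4 : (4:Int) ≤ n := by nlinarith
  set N := n.toNat with hN
  have hnN : n = (N : Int) := by omega
  have hNP : ¬ N.Prime := by
    intro hp
    exact not_compositeI_of_prime hp (by rw [← hnN]; exact ⟨a, b, ha, hab, he⟩)
  have hN1 : N ≠ 1 := by omega
  have hpf := Nat.minFac_prime hN1
  refine ⟨(N.minFac : Int), by exact_mod_cast hpf.two_le, not_compositeI_of_prime hpf, ?_, ?_⟩
  · have := Nat.minFac_sq_le_self (by omega : 0 < N) hNP
    rw [pow_two] at this
    rw [hnN]
    exact_mod_cast this
  · rw [hnN]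
    exact_mod_cast Nat.minFac_dvd N

theorem checkLoop_primes_iff {m r n : Int} (hr1 : 1 ≤ r)
    (hr2 : ¬ ((r + 1) * (r + 1) ≤ m)) (_hn2 : 2 ≤ n) (hnm : n ≤ m) :
    checkLoop n (primesList r (sieveArr r)) = true ↔ ¬ CompositeI n := by
  rw [checkLoop_true_iff n (primesList r (sieveArr r))
    (fun p hp => ((mem_primesList r p).mp hp).1) (pairwise_primesList r)]
  constructor
  · intro H hcomp
    obtain ⟨p, hp2, hpnc, hpp, hpd⟩ := minFactor_of_composite hcomp
    have hpr : p ≤ r := by nlinarith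
    exact H p ((mem_primesList r p).mpr ⟨hp2, hpr, hpnc⟩) hpp hpd
  · intro hnc p hp hpp hpd
    rcases (mem_primesList r p).mp hp with ⟨hp2, -, -⟩
    rcases hpd with ⟨c, hc⟩
    have hpc : p ≤ c := by nlinarith
    exact hnc ⟨p, c, hp2, hpc, hc⟩

theorem prime_filter_eq_alt : ∀ game value, prime_filter game value = prime_filter_alt game value := by
  intro game value
  cases game with
  | nil =>
    simp only [prime_filter, prime_filter_alt, List.foldl_nil]
    exact decide_eq_decide.mpr (by omega)
  | cons x t =>
    simp only [prime_filter, prime_filter_alt]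
    have hmax := PySem.List.le_foldl_max t x
    obtain ⟨hr0, hrg⟩ := rLoop_spec (t.foldl max x) ((t.foldl max x) - 1).toNat 1 (le_refl _)
    have hcongr : ∀ (acc : Int), ∀ nn ∈ x :: t,
        (if isPrimeA nn then acc + 1 else acc) =
        (if 2 ≤ nn then (if checkLoop nn (primesList (rLoop (t.foldl max x) 1) (sieveArr (rLoop (t.foldl max x) 1))) then acc + 1 else acc) else acc) := by
      intro acc nn hnn
      have hnm : nn ≤ t.foldl max x := by
        rcases List.mem_cons.mp hnn with rfl | h
        · exact hmax.1
        · exact hmax.2 nn h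
      by_cases h2 : 2 ≤ nn
      · rw [if_pos h2]
        have hiff : isPrimeA nn = true ↔ checkLoop nn (primesList (rLoop (t.foldl max x) 1) (sieveArr (rLoop (t.foldl max x) 1))) = true := by
          rw [isPrimeA_iff, checkLoop_primes_iff hr0 hrg h2 hnm]
          tauto
        have heq : isPrimeA nn = checkLoop nn (primesList (rLoop (t.foldl max x) 1) (sieveArr (rLoop (t.foldl max x) 1))) := by
          rw [Bool.eq_iff_iff]; simpa using hiff
        rw [heq]
      · rw [if_neg h2]
        have hfalse : isPrimeA nn = false := by
          cases h : isPrimeA nn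
          · rfl
          · exact absurd ((isPrimeA_iff nn).mp h).1 h2
        rw [hfalse]
        simp
    rw [PySem.List.foldl_congr_mem (x :: t) _ _ 0 hcongr]

-- ===== VERDICT (by name: the statement is the Claim_ definition above) =====
theorem prime_filter_spec : Claim_equal_prime_filter :=
  fun game value _ => prime_filter_eq_alt game value
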